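-- pv_equiv track=rewrite | github.com/Kasitphoom/ADA | numberpicking.py | number_picking
-- ===== SOURCE A (Python) =====
-- def number_picking(arr, picked_number):
--     if len(arr) == 0:
--         return True
--
--     pick_left = False
--     pick_right = False
--
--     if abs(picked_number - arr[0]) <= 9:
--         pick_left = number_picking(arr[1:], arr[0])
--     if abs(picked_number - arr[-1]) <= 9:
--         pick_right = number_picking(arr[:-1], arr[-1])
--
--     return pick_left or pick_right
-- ===== SOURCE B (Python) =====
-- def number_picking(arr, picked_number):
--     # Memoized top-down interval search over (l, r, side) states:
--     # side 0 -> last pick was arr[l-1]; side 1 -> last pick was arr[r]; side 2 -> picked_number.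
--     n = len(arr)
--     memo = {}
--     def can(l, r, side):
--         key = (l, r, side)
--         if key in memo:
--             return memo[key]
--         if l == r:
--             res = True
--         else:
--             last = picked_number if side == 2 else (arr[l - 1] if side == 0 else arr[r])
--             res = (abs(last - arr[l]) <= 9 and can(l + 1, r, 0)) or \
--                   (abs(last - arr[r - 1]) <= 9 and can(l, r - 1, 1))
--         memo[key] = res
--         return res
--     return can(0, n, 2)
-- ===== Notes on version B (the rewrite author's own statement) =====
-- stated objective: alternative
-- what changed: Replaced the two-branch recursion on list slices with a memoized top-down search over (left, right, side-of-last-pick) interval states on the unsliced array.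
import Mathlib
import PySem

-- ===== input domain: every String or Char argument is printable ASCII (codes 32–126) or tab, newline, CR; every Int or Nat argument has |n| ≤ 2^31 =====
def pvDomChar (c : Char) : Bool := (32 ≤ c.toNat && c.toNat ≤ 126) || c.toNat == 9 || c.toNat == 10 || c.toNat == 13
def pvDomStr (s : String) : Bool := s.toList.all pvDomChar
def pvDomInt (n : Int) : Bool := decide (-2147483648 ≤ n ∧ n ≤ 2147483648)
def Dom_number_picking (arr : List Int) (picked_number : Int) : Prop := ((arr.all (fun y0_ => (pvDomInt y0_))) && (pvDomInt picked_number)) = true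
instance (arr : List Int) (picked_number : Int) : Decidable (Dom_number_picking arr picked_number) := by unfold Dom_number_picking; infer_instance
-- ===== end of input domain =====

-- B replaces A's two-branch recursion on list slices with a memoized
-- top-down search over (left index, right index, side-of-last-pick) states
-- of the unsliced array.

-- ===== PORT A =====
def number_picking (arr : List Int) (picked_number : Int) : Bool :=
  if h : arr.length = 0 then true
  else
    let a0 := (PySem.List.pyGet? arr 0).getD 0
    let an := (PySem.List.pyGet? arr (-1)).getD 0
    let pick_left := if (picked_number - a0).natAbs ≤ 9 then
        number_picking (PySem.List.slice arr (some 1) none) a0 else false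
    let pick_right := if (picked_number - an).natAbs ≤ 9 then
        number_picking (PySem.List.slice arr none (some (-1))) an else false
    pick_left || pick_right
termination_by arr.length
decreasing_by
  · simp [PySem.List.slice_from_one]; omega
  · simp [PySem.List.slice_to_neg_one]; omega

-- ===== PORT B =====
-- the value of `last` for a memo state (l, r, side)
def lastVal (arr : List Int) (picked_number : Int) (l r side : Nat) : Int :=
  if side == 2 then picked_number
  else if side == 0 then arr.getD (l-1) 0 else arr.getD r 0

-- memoized top-down search; Python tests `l == r` as the base case and states
-- with l > r are unreachable; the structural `fuel` (≥ r - l at every call) and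
-- the `l < r` test only make the same computation total
def canB (arr : List Int) (picked_number : Int) (fuel l r side : Nat)
    (memo : PySem.Dict (Nat × Nat × Nat) Bool) : Bool × PySem.Dict (Nat × Nat × Nat) Bool :=
  match memo.get? (l, r, side) with
  | some v => (v, memo)
  | none =>
    match fuel with
    | 0 => (true, memo.insert (l, r, side) true)
    | fuel + 1 =>
      if l < r then
        let last := lastVal arr picked_number l r side
        if (last - arr.getD l 0).natAbs ≤ 9 then
          let r1 := canB arr picked_number fuel (l+1) r 0 memo
          if r1.1 then (true, r1.2.insert (l, r, side) true)
          else if (last - arr.getD (r-1) 0).natAbs ≤ 9 then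
            let r2 := canB arr picked_number fuel l (r-1) 1 r1.2
            (r2.1, r2.2.insert (l, r, side) r2.1)
          else (false, r1.2.insert (l, r, side) false)
        else if (last - arr.getD (r-1) 0).natAbs ≤ 9 then
          let r2 := canB arr picked_number fuel l (r-1) 1 memo
          (r2.1, r2.2.insert (l, r, side) r2.1)
        else (false, memo.insert (l, r, side) false)
      else (true, memo.insert (l, r, side) true)

def number_picking_alt (arr : List Int) (picked_number : Int) : Bool :=
  (canB arr picked_number arr.length 0 arr.length 2 PySem.Dict.empty).1

-- ===== PRECONDITION & SPEC =====
def Spec_number_picking (arr : List Int) (picked_number : Int) (out : Bool) : Prop := out = number_picking_alt arr picked_number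
instance (arr : List Int) (picked_number : Int) (out : Bool) : Decidable (Spec_number_picking arr picked_number out) := by unfold Spec_number_picking; infer_instance

-- ===== CLAIM (what is proved, stated in full; the proofs are below) =====
def Claim_equal_number_picking : Prop := ∀ (arr : List Int) (picked_number : Int), Dom_number_picking arr picked_number → Spec_number_picking arr picked_number (number_picking arr picked_number)

-- ===== LEMMAS AND PROOFS =====

-- reference recursion on interval indices: can arr[l:r) be fully consumed
-- when the previously picked value is `last`
def npG (arr : List Int) (last : Int) (l r : Nat) : Bool :=
  if _h : l < r then
    (decide ((last - arr.getD l 0).natAbs ≤ 9) && npG arr (arr.getD l 0) (l+1) r) ||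
    (decide ((last - arr.getD (r-1) 0).natAbs ≤ 9) && npG arr (arr.getD (r-1) 0) l (r-1))
  else true
termination_by r - l

theorem npG_of_not_lt (arr : List Int) (last : Int) (l r : Nat) (h : ¬ l < r) :
    npG arr last l r = true := by
  rw [npG]; simp [h]

theorem npG_of_lt (arr : List Int) (last : Int) (l r : Nat) (h : l < r) :
    npG arr last l r =
      ((decide ((last - arr.getD l 0).natAbs ≤ 9) && npG arr (arr.getD l 0) (l+1) r) ||
       (decide ((last - arr.getD (r-1) 0).natAbs ≤ 9) && npG arr (arr.getD (r-1) 0) l (r-1))) := by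
  rw [npG]; simp [h]

theorem if_eq_and (c : Prop) [Decidable c] (x : Bool) :
    (if c then x else false) = (decide c && x) := by
  by_cases h : c <;> simp [h]

-- A's slice recursion computes npG
theorem A_eq_npG (arr : List Int) :
    ∀ (k l r : Nat) (p : Int), r - l = k → r ≤ arr.length →
      number_picking ((arr.drop l).take (r - l)) p = npG arr p l r := by
  intro k
  induction k with
  | zero =>
    intro l r p hk _
    rw [number_picking, npG]
    simp [hk, Nat.sub_eq_zero_iff_le.mp hk]
  | succ k ih =>
    intro l r p hk hr
    have hlr : l < r := by omega
    set s := (arr.drop l).take (r - l) with hs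
    have hlen : s.length = r - l := by
      simp [hs]; omega
    have hl : l < arr.length := by omega
    have hr1 : r - 1 < arr.length := by omega
    have hhead : s[0]? = some (arr.getD l 0) := by
      rw [hs, List.getElem?_take_of_lt (by omega : (0:Nat) < r - l), List.getElem?_drop,
        List.getD_eq_getElem?_getD]
      simp [List.getElem?_eq_getElem hl]
    have hlast : s[s.length - 1]? = some (arr.getD (r-1) 0) := by
      have h2 : s.length - 1 = r - l - 1 := by omega
      rw [h2, hs, List.getElem?_take_of_lt (by omega), List.getElem?_drop]
      have h3 : l + (r - l - 1) = r - 1 := by omega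
      rw [h3, List.getD_eq_getElem?_getD, List.getElem?_eq_getElem hr1]
      simp
    have hget0 : (PySem.List.pyGet? s 0).getD 0 = arr.getD l 0 := by
      rw [PySem.List.pyGet?_zero, hhead]; rfl
    have hgetn : (PySem.List.pyGet? s (-1)).getD 0 = arr.getD (r-1) 0 := by
      rw [PySem.List.pyGet?_neg_one, List.getLast?_eq_getElem?, hlast]; rfl
    have htail : PySem.List.slice s (some 1) none = (arr.drop (l+1)).take (r - (l+1)) := by
      rw [PySem.List.slice_from_one, hs, ← List.drop_one, List.drop_take,
        List.drop_drop]
      have hcnt : r - l - 1 = r - (l + 1) := by omega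
      rw [hcnt]
    have hdl : PySem.List.slice s none (some (-1)) = (arr.drop l).take ((r-1) - l) := by
      rw [PySem.List.slice_to_neg_one, hs, List.dropLast_eq_take, List.take_take, hlen]
      congr 1; omega
    rw [number_picking]
    have hne : ¬ s.length = 0 := by omega
    simp only [hne, dite_false, hget0, hgetn, htail, hdl]
    rw [if_eq_and, if_eq_and,
        ih (l+1) r (arr.getD l 0) (by omega) hr,
        ih l (r-1) (arr.getD (r-1) 0) (by omega) (by omega),
        npG_of_lt arr p l r hlr]

-- every memo entry records the npG value of its state
def goodMemo (arr : List Int) (p : Int) (memo : PySem.Dict (Nat × Nat × Nat) Bool) : Prop :=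
  ∀ l r side v, memo.get? (l, r, side) = some v → v = npG arr (lastVal arr p l r side) l r

theorem goodMemo_insert (arr : List Int) (p : Int) (memo : PySem.Dict (Nat × Nat × Nat) Bool)
    (l r side : Nat) (v : Bool) (h : goodMemo arr p memo)
    (hv : v = npG arr (lastVal arr p l r side) l r) :
    goodMemo arr p (memo.insert (l, r, side) v) := by
  intro l' r' s' w hw
  rw [PySem.Dict.get?_insert] at hw
  by_cases he : (l', r', s') = ((l, r, side) : Nat × Nat × Nat)
  · rw [if_pos he, Option.some_inj] at hw
    simp only [Prod.mk.injEq] at he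
    obtain ⟨e1, e2, e3⟩ := he
    subst e1; subst e2; subst e3
    rw [← hw]; exact hv
  · rw [if_neg he] at hw
    exact h l' r' s' w hw

theorem lastVal_left (arr : List Int) (p : Int) (l r : Nat) :
    lastVal arr p (l+1) r 0 = arr.getD l 0 := by
  simp [lastVal]

theorem lastVal_right (arr : List Int) (p : Int) (l r : Nat) :
    lastVal arr p l (r-1) 1 = arr.getD (r-1) 0 := by
  simp [lastVal]

theorem canB_base (arr : List Int) (p : Int) (l r side : Nat)
    (memo : PySem.Dict (Nat × Nat × Nat) Bool) (hg : goodMemo arr p memo) (hlr : ¬ l < r) :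
    (true : Bool) = npG arr (lastVal arr p l r side) l r ∧
    goodMemo arr p (memo.insert (l, r, side) true) := by
  have hv : (true : Bool) = npG arr (lastVal arr p l r side) l r :=
    (npG_of_not_lt arr _ l r hlr).symm
  exact ⟨hv, goodMemo_insert arr p memo l r side true hg hv⟩

theorem canB_correct (arr : List Int) (p : Int) :
    ∀ (fuel l r side : Nat) (memo : PySem.Dict (Nat × Nat × Nat) Bool), r - l ≤ fuel →
      goodMemo arr p memo →
      (canB arr p fuel l r side memo).1 = npG arr (lastVal arr p l r side) l r ∧
      goodMemo arr p (canB arr p fuel l r side memo).2 := by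
  intro fuel
  induction fuel with
  | zero =>
    intro l r side memo hk hg
    rw [canB]
    cases hget : memo.get? (l, r, side) with
    | some v => exact ⟨hg l r side v hget, hg⟩
    | none => exact canB_base arr p l r side memo hg (by omega)
  | succ k ih =>
    intro l r side memo hk hg
    rw [canB]
    cases hget : memo.get? (l, r, side) with
    | some v => exact ⟨hg l r side v hget, hg⟩
    | none =>
      by_cases hlr : l < r
      · simp only [if_pos hlr]
        rw [npG_of_lt arr _ l r hlr]
        obtain ⟨ihL1, ihL2⟩ := ih (l+1) r 0 memo (by omega) hg
        by_cases c1 : (lastVal arr p l r side - arr.getD l 0).natAbs ≤ 9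
        · simp only [if_pos c1]
          rw [lastVal_left] at ihL1
          by_cases hv1 : (canB arr p k (l+1) r 0 memo).1 = true
          · simp only [hv1]
            have hval : (true : Bool) =
                ((decide ((lastVal arr p l r side - arr.getD l 0).natAbs ≤ 9) &&
                  npG arr (arr.getD l 0) (l+1) r) ||
                 (decide ((lastVal arr p l r side - arr.getD (r-1) 0).natAbs ≤ 9) &&
                  npG arr (arr.getD (r-1) 0) l (r-1))) := by
              rw [← ihL1, hv1, decide_eq_true c1]
              simp only [Bool.true_and, Bool.true_or]
            refine ⟨hval, goodMemo_insert arr p _ l r side true ihL2 ?_⟩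
            rw [npG_of_lt arr _ l r hlr]; exact hval
          · have hv1' : (canB arr p k (l+1) r 0 memo).1 = false := by
              cases h : (canB arr p k (l+1) r 0 memo).1
              · rfl
              · exact absurd h hv1
            simp only [hv1', Bool.false_eq_true, if_false]
            obtain ⟨ihR1, ihR2⟩ := ih l (r-1) 1 (canB arr p k (l+1) r 0 memo).2 (by omega) ihL2
            rw [lastVal_right] at ihR1
            by_cases c2 : (lastVal arr p l r side - arr.getD (r-1) 0).natAbs ≤ 9
            · simp only [if_pos c2]
              have hval : (canB arr p k l (r-1) 1 (canB arr p k (l+1) r 0 memo).2).1 =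
                  ((decide ((lastVal arr p l r side - arr.getD l 0).natAbs ≤ 9) &&
                    npG arr (arr.getD l 0) (l+1) r) ||
                   (decide ((lastVal arr p l r side - arr.getD (r-1) 0).natAbs ≤ 9) &&
                    npG arr (arr.getD (r-1) 0) l (r-1))) := by
                rw [ihR1, ← ihL1, hv1', decide_eq_true c1, decide_eq_true c2]
                simp only [Bool.true_and, Bool.and_false, Bool.false_or]
              refine ⟨hval, goodMemo_insert arr p _ l r side _ ihR2 ?_⟩
              rw [npG_of_lt arr _ l r hlr]; exact hval
            · simp only [if_neg c2]
              have hval : (false : Bool) =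
                  ((decide ((lastVal arr p l r side - arr.getD l 0).natAbs ≤ 9) &&
                    npG arr (arr.getD l 0) (l+1) r) ||
                   (decide ((lastVal arr p l r side - arr.getD (r-1) 0).natAbs ≤ 9) &&
                    npG arr (arr.getD (r-1) 0) l (r-1))) := by
                rw [← ihL1, hv1', decide_eq_false c2]
                simp only [Bool.and_false, Bool.false_and, Bool.false_or]
              refine ⟨hval, goodMemo_insert arr p _ l r side false ihL2 ?_⟩
              rw [npG_of_lt arr _ l r hlr]; exact hval
        · simp only [if_neg c1]
          by_cases c2 : (lastVal arr p l r side - arr.getD (r-1) 0).natAbs ≤ 9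
          · simp only [if_pos c2]
            obtain ⟨ihR1, ihR2⟩ := ih l (r-1) 1 memo (by omega) hg
            rw [lastVal_right] at ihR1
            have hval : (canB arr p k l (r-1) 1 memo).1 =
                ((decide ((lastVal arr p l r side - arr.getD l 0).natAbs ≤ 9) &&
                  npG arr (arr.getD l 0) (l+1) r) ||
                 (decide ((lastVal arr p l r side - arr.getD (r-1) 0).natAbs ≤ 9) &&
                  npG arr (arr.getD (r-1) 0) l (r-1))) := by
              rw [ihR1, decide_eq_false c1, decide_eq_true c2]
              simp only [Bool.false_and, Bool.false_or, Bool.true_and]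
            refine ⟨hval, goodMemo_insert arr p _ l r side _ ihR2 ?_⟩
            rw [npG_of_lt arr _ l r hlr]; exact hval
          · simp only [if_neg c2]
            have hval : (false : Bool) =
                ((decide ((lastVal arr p l r side - arr.getD l 0).natAbs ≤ 9) &&
                  npG arr (arr.getD l 0) (l+1) r) ||
                 (decide ((lastVal arr p l r side - arr.getD (r-1) 0).natAbs ≤ 9) &&
                  npG arr (arr.getD (r-1) 0) l (r-1))) := by
              rw [decide_eq_false c1, decide_eq_false c2]
              simp only [Bool.false_and, Bool.false_or]
            refine ⟨hval, goodMemo_insert arr p _ l r side false hg ?_⟩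
            rw [npG_of_lt arr _ l r hlr]; exact hval
      · simp only [if_neg hlr]
        exact canB_base arr p l r side memo hg hlr

-- ===== VERDICT (by name: the statement is the Claim_ definition above) =====
theorem number_picking_spec : Claim_equal_number_picking := by
  intro arr p _
  unfold Spec_number_picking number_picking_alt
  have hempty : goodMemo arr p PySem.Dict.empty := by
    intro l r side v hv
    rw [PySem.Dict.get?_empty] at hv
    exact absurd hv (by simp)
  obtain ⟨h1, _⟩ := canB_correct arr p arr.length 0 arr.length 2 PySem.Dict.empty (by omega) hempty
  rw [h1]
  have hA := A_eq_npG arr arr.length 0 arr.length p rfl (le_refl _)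
  rw [Nat.sub_zero, List.drop_zero, List.take_length] at hA
  rw [hA]
  simp [lastVal]
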